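-- pv_equiv track=rewrite | github.com/JanHendrikDolling/configvalidator | configvalidator/validators/__init__.py | subnet_mask_int_to_bit
-- ===== SOURCE A (Python) =====
-- def subnet_mask_int_to_bit(subnet_mask):
--     assert 0 <= subnet_mask <= 128
--     res = ""
--     for r in range(subnet_mask):
--         res += "1"
--         if r % 16 == 15 and r != 127:
--             res += "."
--     return res
-- ===== SOURCE B (Python) =====
-- def subnet_mask_int_to_bit(subnet_mask):
--     assert 0 <= subnet_mask <= 128
--     full, rem = divmod(subnet_mask, 16)
--     groups = ["1" * 16] * full
--     if rem:
--         groups.append("1" * rem)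
--     return ".".join(groups)
-- ===== Notes on version B (the rewrite author's own statement) =====
-- stated objective: simpler
-- what changed: Replaces the per-bit loop with a modular dot check by a divmod into 16-bit groups joined with '.', which also drops A's spurious trailing dot on positive multiples of 16 below 128.
-- intended difference: For subnet_mask in {16,32,48,64,80,96,112} A returns the bit string with a spurious trailing '.' (e.g. '1111111111111111.' for 16) while B returns it without the trailing dot, which is the intended well-formed group string. — e.g. on subnet_mask_int_to_bit(16): A returns "1111111111111111.", B returns "1111111111111111"
import Mathlib
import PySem

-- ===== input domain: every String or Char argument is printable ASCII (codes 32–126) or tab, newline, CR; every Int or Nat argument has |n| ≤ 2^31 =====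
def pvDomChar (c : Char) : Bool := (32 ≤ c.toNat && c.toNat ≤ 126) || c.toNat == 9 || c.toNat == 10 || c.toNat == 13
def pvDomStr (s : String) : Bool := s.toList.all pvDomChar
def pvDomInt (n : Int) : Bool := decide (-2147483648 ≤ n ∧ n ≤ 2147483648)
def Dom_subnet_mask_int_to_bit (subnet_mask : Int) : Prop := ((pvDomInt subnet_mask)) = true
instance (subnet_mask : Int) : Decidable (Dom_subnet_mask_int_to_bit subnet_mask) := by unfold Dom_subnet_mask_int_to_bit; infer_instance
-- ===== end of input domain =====

set_option maxRecDepth 8192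
set_option maxHeartbeats 2000000


-- B replaces the per-bit loop with a divmod into 16-bit groups joined with '.'; simpler, and drops A's spurious trailing dot on positive multiples of 16 below 128.

-- ===== PORT A =====
def subnet_mask_int_to_bit (subnet_mask : Int) : String :=
  (PySem.List.pyRange 0 subnet_mask 1).foldl
    (fun res r =>
      let res := res ++ "1"
      if PySem.Int.mod r 16 == 15 && r != 127 then res ++ "." else res) ""

-- ===== PORT B =====
def subnet_mask_int_to_bit_alt (subnet_mask : Int) : String :=
  let full := PySem.Int.floordiv subnet_mask 16
  let rem := PySem.Int.mod subnet_mask 16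
  let groups := List.replicate full.toNat (String.ofList (List.replicate 16 '1'))
  let groups := if rem ≠ 0 then groups ++ [String.ofList (List.replicate rem.toNat '1')] else groups
  String.intercalate "." groups

-- ===== PRECONDITION & SPEC =====
-- A asserts 0 <= subnet_mask <= 128 (AssertionError outside); Pre_ is exactly that.
def Pre_subnet_mask_int_to_bit (subnet_mask : Int) : Prop := 0 ≤ subnet_mask ∧ subnet_mask ≤ 128
instance (subnet_mask : Int) : Decidable (Pre_subnet_mask_int_to_bit subnet_mask) := by unfold Pre_subnet_mask_int_to_bit; infer_instance
def pvWitness_subnet_mask_int_to_bit : Int := (24)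

-- On positive multiples of 16 below 128, A returns the bit string with a spurious trailing '.' (e.g. '1111111111111111.' for 16); B returns it without the trailing dot, the intended well-formed group string.
def D_subnet_mask_int_to_bit (subnet_mask : Int) : Prop :=
  PySem.Int.mod subnet_mask 16 = 0 ∧ 0 < subnet_mask ∧ subnet_mask < 128
instance (subnet_mask : Int) : Decidable (D_subnet_mask_int_to_bit subnet_mask) := by unfold D_subnet_mask_int_to_bit; infer_instance

def Spec_subnet_mask_int_to_bit (subnet_mask : Int) (out : String) : Prop := ¬ D_subnet_mask_int_to_bit subnet_mask → out = subnet_mask_int_to_bit_alt subnet_mask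
instance (subnet_mask : Int) (out : String) : Decidable (Spec_subnet_mask_int_to_bit subnet_mask out) := by unfold Spec_subnet_mask_int_to_bit; infer_instance

def pvDiffWitness_subnet_mask_int_to_bit : Int := (16)
def pvDiffWitnessOut_subnet_mask_int_to_bit : String × String := ("1111111111111111.", "1111111111111111")

-- ===== CLAIM (what is proved, stated in full; the proofs are below) =====
def Claim_unchanged_subnet_mask_int_to_bit : Prop := ∀ (subnet_mask : Int), Dom_subnet_mask_int_to_bit subnet_mask → Pre_subnet_mask_int_to_bit subnet_mask → Spec_subnet_mask_int_to_bit subnet_mask (subnet_mask_int_to_bit subnet_mask)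
def Claim_changed_subnet_mask_int_to_bit : Prop := Dom_subnet_mask_int_to_bit (pvDiffWitness_subnet_mask_int_to_bit) ∧ Pre_subnet_mask_int_to_bit (pvDiffWitness_subnet_mask_int_to_bit) ∧ D_subnet_mask_int_to_bit (pvDiffWitness_subnet_mask_int_to_bit) ∧ subnet_mask_int_to_bit (pvDiffWitness_subnet_mask_int_to_bit) = pvDiffWitnessOut_subnet_mask_int_to_bit.1 ∧ subnet_mask_int_to_bit_alt (pvDiffWitness_subnet_mask_int_to_bit) = pvDiffWitnessOut_subnet_mask_int_to_bit.2 ∧ pvDiffWitnessOut_subnet_mask_int_to_bit.1 ≠ pvDiffWitnessOut_subnet_mask_int_to_bit.2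
def Claim_exact_subnet_mask_int_to_bit : Prop := ∀ (subnet_mask : Int), Dom_subnet_mask_int_to_bit subnet_mask → Pre_subnet_mask_int_to_bit subnet_mask → D_subnet_mask_int_to_bit subnet_mask → subnet_mask_int_to_bit subnet_mask ≠ subnet_mask_int_to_bit_alt subnet_mask

-- ===== LEMMAS AND PROOFS =====

-- ===== VERDICT (by name: the statement is the Claim_ definition above) =====
theorem subnet_mask_int_to_bit_spec : Claim_unchanged_subnet_mask_int_to_bit := by
  intro n _ hp hnd
  obtain ⟨h0, h1⟩ := hp
  interval_cases n <;> first
    | (exact absurd (by decide) hnd)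
    | rfl

theorem subnet_mask_int_to_bit_changed : Claim_changed_subnet_mask_int_to_bit := by
  unfold Claim_changed_subnet_mask_int_to_bit; decide

theorem subnet_mask_int_to_bit_tight : Claim_exact_subnet_mask_int_to_bit := by
  intro n _ hp hd
  obtain ⟨h0, h1⟩ := hp
  interval_cases n <;> first
    | (exact absurd hd (by decide))
    | decide
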